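-- pv_equiv track=rewrite | github.com/AaQiBNoONaRi/saer.pk-backend | app/routes/dashboard.py | _booking_status_counts
-- ===== SOURCE A (Python) =====
-- DONE_STATUSES      = {'approved', 'done', 'completed'}
--
-- CANCELLED_STATUSES = {'cancelled', 'canceled', 'expired', 'rejected'}
--
-- def _booking_status_counts(docs: list) -> dict:
--     """Return done / booked / cancelled counts for a list of booking docs."""
--     done = booked = cancelled = 0
--     for doc in docs:
--         raw = (doc.get('booking_status') or doc.get('status') or '').lower()
--         if raw in DONE_STATUSES:
--             done += 1
--         elif raw in CANCELLED_STATUSES: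
--             cancelled += 1
--         else:
--             booked += 1   # confirmed, underprocess, unknown → Booked
--     return {
--         "total":     len(docs),
--         "done":      done,
--         "booked":    booked,
--         "cancelled": cancelled,
--     }
-- ===== SOURCE B (Python) =====
-- DONE_STATUSES      = {'approved', 'done', 'completed'}
--
-- CANCELLED_STATUSES = {'cancelled', 'canceled', 'expired', 'rejected'}
--
-- def _booking_status_counts(docs: list) -> dict:
--     """Histogram of normalized statuses first, then aggregate the (few)
--     distinct statuses into categories; 'booked' falls out by subtraction."""
--     freq = {}
--     for doc in docs:
--         raw = (doc.get('booking_status') or doc.get('status') or '').lower()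
--         freq[raw] = freq.get(raw, 0) + 1
--     done = sum(v for k, v in freq.items() if k in DONE_STATUSES)
--     cancelled = sum(v for k, v in freq.items() if k in CANCELLED_STATUSES)
--     total = len(docs)
--     return {
--         "total":     total,
--         "done":      done,
--         "booked":    total - done - cancelled,
--         "cancelled": cancelled,
--     }
-- ===== Notes on version B (the rewrite author's own statement) =====
-- stated objective: alternative
-- what changed: B first builds a frequency dictionary (histogram) of normalized statuses in one pass, then aggregates the distinct statuses into the done/cancelled categories by summing the histogram's values, deriving 'booked' by subtraction; A classifies each doc with a three-way branch inside the loop.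
import Mathlib
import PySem

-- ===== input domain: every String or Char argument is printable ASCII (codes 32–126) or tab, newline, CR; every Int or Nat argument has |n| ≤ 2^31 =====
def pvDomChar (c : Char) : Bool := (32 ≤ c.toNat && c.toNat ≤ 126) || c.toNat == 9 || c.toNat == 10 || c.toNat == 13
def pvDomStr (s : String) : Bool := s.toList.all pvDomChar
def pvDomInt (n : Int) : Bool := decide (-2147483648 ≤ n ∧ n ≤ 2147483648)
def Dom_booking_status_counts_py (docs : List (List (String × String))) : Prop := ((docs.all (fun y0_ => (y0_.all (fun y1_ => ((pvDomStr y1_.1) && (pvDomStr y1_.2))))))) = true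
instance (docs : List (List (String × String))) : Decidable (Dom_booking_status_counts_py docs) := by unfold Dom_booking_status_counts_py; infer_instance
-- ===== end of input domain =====

-- B builds a frequency dictionary of normalized statuses first, then aggregates the distinct
-- statuses into categories ('booked' by subtraction); same O(n) cost, different organisation.

-- shared per-doc status extraction (identical in both Pythons)
-- '(x or y)' on strings/None: falsy = None or ''
def pvOrStr (o : Option String) (d : String) : String :=
  match o with
  | some x => if x = "" then d else x
  | none => d

-- raw = (doc.get('booking_status') or doc.get('status') or '').lower()
def pvRaw (doc : List (String × String)) : String :=
  PySem.Str.lower (pvOrStr ((doc.find? (fun kv => kv.1 == "booking_status")).map (·.2))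
    (pvOrStr ((doc.find? (fun kv => kv.1 == "status")).map (·.2)) ""))

def pvDoneList : List String := ["approved", "done", "completed"]
def pvCancList : List String := ["cancelled", "canceled", "expired", "rejected"]

-- ===== PORT A =====
-- loop body of A's for-loop: (done, booked, cancelled) accumulator, if/elif/else chain
def pvStep (acc : Int × Int × Int) (doc : List (String × String)) : Int × Int × Int :=
  let raw := pvRaw doc
  if raw ∈ pvDoneList then (acc.1 + 1, acc.2.1, acc.2.2)
  else if raw ∈ pvCancList then (acc.1, acc.2.1, acc.2.2 + 1)
  else (acc.1, acc.2.1 + 1, acc.2.2)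

def booking_status_counts_py (docs : List (List (String × String))) : List (String × Int) :=
  let st := docs.foldl pvStep (0, 0, 0)
  [("total", PySem.List.len docs), ("done", st.1), ("booked", st.2.1), ("cancelled", st.2.2)]

-- ===== PORT B =====
def booking_status_counts_py_alt (docs : List (List (String × String))) : List (String × Int) :=
  -- freq[raw] = freq.get(raw, 0) + 1 over all docs
  let freq : PySem.Dict String Int := docs.foldl (fun d doc =>
      let raw := pvRaw doc
      d.insert raw (d.getD raw 0 + 1)) PySem.Dict.empty
  -- done = sum(v for k, v in freq.items() if k in DONE_STATUSES)
  let done : Int := ((freq.items.filter (fun kv => decide (kv.1 ∈ pvDoneList))).map (·.2)).sum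
  let cancelled : Int := ((freq.items.filter (fun kv => decide (kv.1 ∈ pvCancList))).map (·.2)).sum
  let total := PySem.List.len docs
  [("total", total), ("done", done), ("booked", total - done - cancelled), ("cancelled", cancelled)]

-- ===== PRECONDITION & SPEC =====
def Spec_booking_status_counts_py (docs : List (List (String × String))) (out : List (String × Int)) : Prop := out = booking_status_counts_py_alt docs
instance (docs : List (List (String × String))) (out : List (String × Int)) : Decidable (Spec_booking_status_counts_py docs out) := by unfold Spec_booking_status_counts_py; infer_instance

-- ===== CLAIM (what is proved, stated in full; the proofs are below) =====
def Claim_equal_booking_status_counts_py : Prop := ∀ (docs : List (List (String × String))), Dom_booking_status_counts_py docs → Spec_booking_status_counts_py docs (booking_status_counts_py docs)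

-- ===== LEMMAS AND PROOFS =====

-- the two per-doc category tests
def pvPD (d : List (String × String)) : Bool := decide (pvRaw d ∈ pvDoneList)
def pvPC (d : List (String × String)) : Bool := decide (pvRaw d ∈ pvCancList)

lemma pvDisj (d : List (String × String)) (h : pvPC d = true) : pvPD d = false := by
  have h' : pvRaw d ∈ pvCancList := by simpa [pvPC] using h
  simp only [pvCancList, List.mem_cons, List.not_mem_nil, or_false] at h'
  simp only [pvPD, pvDoneList, decide_eq_false_iff_not]
  rcases h' with h' | h' | h' | h' <;> rw [h'] <;> decide

-- A's loop computes the three countP's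
lemma pvLoop : ∀ (docs : List (List (String × String))) (a b c : Int),
    docs.foldl pvStep (a, b, c) =
      (a + docs.countP pvPD,
       b + docs.countP (fun d => !pvPD d && !pvPC d),
       c + docs.countP pvPC) := by
  intro docs
  induction docs with
  | nil => intro a b c; simp
  | cons x xs ih =>
    intro a b c
    simp only [List.foldl_cons, List.countP_cons]
    by_cases hD : pvPD x = true
    · have hC : pvPC x = false := by
        by_contra h
        simp only [Bool.not_eq_false] at h
        exact absurd (pvDisj x h) (by simp [hD])
      have hD' : pvRaw x ∈ pvDoneList := by simpa [pvPD] using hD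
      have hstep : pvStep (a, b, c) x = (a + 1, b, c) := by
        unfold pvStep; simp [hD']
      rw [hstep, ih]
      simp [hD, hC]
      ring
    · by_cases hC : pvPC x = true
      · have hD' : ¬ pvRaw x ∈ pvDoneList := by simpa [pvPD] using hD
        have hC' : pvRaw x ∈ pvCancList := by simpa [pvPC] using hC
        have hstep : pvStep (a, b, c) x = (a, b, c + 1) := by
          unfold pvStep; simp [hD', hC']
        rw [hstep, ih]
        simp [hD, hC]
        ring
      · have hD' : ¬ pvRaw x ∈ pvDoneList := by simpa [pvPD] using hD
        have hC' : ¬ pvRaw x ∈ pvCancList := by simpa [pvPC] using hC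
        have hstep : pvStep (a, b, c) x = (a, b + 1, c) := by
          unfold pvStep; simp [hD', hC']
        rw [hstep, ih]
        simp [hD, hC]
        ring

-- the three categories partition the docs
lemma pvPartition : ∀ (docs : List (List (String × String))),
    docs.countP pvPD + docs.countP (fun d => !pvPD d && !pvPC d) + docs.countP pvPC
      = docs.length := by
  intro docs
  induction docs with
  | nil => simp
  | cons x xs ih =>
    simp only [List.countP_cons, List.length_cons]
    by_cases hD : pvPD x = true
    · have hC : pvPC x = false := by
        by_contra h
        simp only [Bool.not_eq_false] at h
        exact absurd (pvDisj x h) (by simp [hD])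
      simp [hD, hC]; omega
    · by_cases hC : pvPC x = true
      · simp [hD, hC]; omega
      · simp only [Bool.not_eq_true] at hD hC
        simp [hD, hC]; omega

-- ∑ over a list of the indicator of one value = count of that value
lemma pvSumIndicator (m : List String) (y : String) :
    (m.map (fun k => if k = y then (1 : Int) else 0)).sum = (m.count y : Int) := by
  induction m with
  | nil => simp
  | cons a t ih =>
    simp only [List.map_cons, List.sum_cons, List.count_cons, ih]
    by_cases h : a = y
    · subst h; simp; omega
    · simp [h]

-- count in a Nodup list is the membership indicator
lemma pvCountNodup (m : List String) (hm : m.Nodup) (y : String) :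
    (m.count y : Int) = if y ∈ m then 1 else 0 := by
  by_cases h : y ∈ m
  · have h1 : m.count y ≤ 1 := List.nodup_iff_count_le_one.mp hm y
    have h2 : 1 ≤ m.count y := List.count_pos_iff.mpr h
    have : m.count y = 1 := le_antisymm h1 h2
    simp [this, h]
  · simp [List.count_eq_zero.mpr h, h]

-- summing histogram values over the keys in a category = number of list elements in the category
lemma pvSumCount (P : String → Bool) :
    ∀ (ys : List String) (l : List String), l.Nodup → (∀ y ∈ ys, P y = true → y ∈ l) →
      (((l.filter P).map (fun k => (ys.count k : Int))).sum) = (ys.countP P : Int) := by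
  intro ys
  induction ys with
  | nil => intro l _ _; simp
  | cons y t ih =>
    intro l hl hsub
    have hsub' : ∀ z ∈ t, P z = true → z ∈ l := fun z hz => hsub z (List.mem_cons_of_mem _ hz)
    have hsplit : ((l.filter P).map (fun k => (((y :: t).count k : Nat) : Int))).sum
        = ((l.filter P).map (fun k => (t.count k : Int))).sum
          + ((l.filter P).map (fun k => if k = y then (1 : Int) else 0)).sum := by
      rw [← List.sum_map_add]
      congr 1
      apply List.map_congr_left
      intro k _
      simp only [List.count_cons]
      by_cases h : k = y
      · subst h; simp
      · simp [h]
        exact fun hh => h hh.symm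
    rw [hsplit, ih l hl hsub', pvSumIndicator]
    have hmnd : (l.filter P).Nodup := List.Nodup.filter _ hl
    rw [pvCountNodup _ hmnd]
    simp only [List.countP_cons]
    by_cases hP : P y = true
    · have : y ∈ l.filter P := List.mem_filter.mpr ⟨hsub y (List.mem_cons_self) hP, hP⟩
      simp [this, hP]
    · have : y ∉ l.filter P := fun hc => hP (List.mem_filter.mp hc).2
      simp [this, hP]

-- B's histogram sums are the docs countP's
lemma pvAltSum (docs : List (List (String × String))) (P : String → Bool) :
    ((((PySem.Dict.counter (docs.map pvRaw)).items.filter (fun kv => P kv.1)).map (·.2)).sum)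
      = (docs.countP (fun d => P (pvRaw d)) : Int) := by
  set ys := docs.map pvRaw with hys
  rw [PySem.Dict.items_counter]
  have h1 : ((PySem.Set.ofList ys).map (fun k => (k, (ys.count k : Int)))).filter (fun kv => P kv.1)
      = ((PySem.Set.ofList ys).filter P).map (fun k => (k, (ys.count k : Int))) := by
    rw [List.filter_map]
    rfl
  rw [h1, List.map_map]
  have h2 : (((PySem.Set.ofList ys).filter P).map ((·.2) ∘ (fun k => (k, (ys.count k : Int))))).sum
      = (((PySem.Set.ofList ys).filter P).map (fun k => (ys.count k : Int))).sum := rfl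
  rw [h2, pvSumCount P ys (PySem.Set.ofList ys) (PySem.Set.nodup_ofList ys)
    (fun y hy _ => (PySem.Set.mem_ofList _ _).mpr hy)]
  rw [hys, List.countP_map]
  rfl

-- ===== VERDICT (by name: the statement is the Claim_ definition above) =====
theorem booking_status_counts_py_spec : Claim_equal_booking_status_counts_py := by
  unfold Claim_equal_booking_status_counts_py
  intro docs _
  unfold Spec_booking_status_counts_py booking_status_counts_py booking_status_counts_py_alt
  have hfreq : docs.foldl (fun d doc =>
      let raw := pvRaw doc
      PySem.Dict.insert d raw (d.getD raw 0 + 1)) PySem.Dict.empty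
      = PySem.Dict.counter (docs.map pvRaw) := by
    rw [← PySem.Dict.foldl_insert_getD_add_one_eq_counter, List.foldl_map]
  simp only [hfreq]
  rw [pvLoop]
  have hdone := pvAltSum docs (fun s => decide (s ∈ pvDoneList))
  have hcanc := pvAltSum docs (fun s => decide (s ∈ pvCancList))
  simp only [hdone, hcanc]
  have e1 : docs.countP (fun d => decide (pvRaw d ∈ pvDoneList)) = docs.countP pvPD := rfl
  have e2 : docs.countP (fun d => decide (pvRaw d ∈ pvCancList)) = docs.countP pvPC := rfl
  rw [e1, e2]
  have hb : (docs.countP (fun d => !pvPD d && !pvPC d) : Int)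
      = PySem.List.len docs - docs.countP pvPD - docs.countP pvPC := by
    have hp := pvPartition docs
    simp only [PySem.List.len_eq]
    omega
  simp only [zero_add, hb]
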